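-- pv_equiv track=rewrite | github.com/PEC-CSS/Graveyard2025 | ml/CodeOptimizer/data/optimized_code/optimized_user_code.py | calculate_a_b
-- ===== SOURCE A (Python) =====
-- def calculate_a_b(x, y):
--     if x > 10:
--         a = sum(i * x for i in range(10))
--         b = sum(j * y for j in range(5))
--     else:
--         a = sum(i * j * x for i in range(5) for j in range(5))
--         b = sum(i + j for i in range(5) for j in range(5) if j % 2 == 0)
--     return a, b
-- ===== SOURCE B (Python) =====
-- def calculate_a_b(x, y):
--     if x > 10:
--         return 45 * x, 10 * y
--     return 100 * x, 60
-- ===== Notes on version B (the rewrite author's own statement) =====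
-- stated objective: simpler
-- what changed: Replaced the fixed-range summation loops with their closed-form constants: a=45*x, b=10*y when x>10, else a=100*x, b=60.
import Mathlib
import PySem

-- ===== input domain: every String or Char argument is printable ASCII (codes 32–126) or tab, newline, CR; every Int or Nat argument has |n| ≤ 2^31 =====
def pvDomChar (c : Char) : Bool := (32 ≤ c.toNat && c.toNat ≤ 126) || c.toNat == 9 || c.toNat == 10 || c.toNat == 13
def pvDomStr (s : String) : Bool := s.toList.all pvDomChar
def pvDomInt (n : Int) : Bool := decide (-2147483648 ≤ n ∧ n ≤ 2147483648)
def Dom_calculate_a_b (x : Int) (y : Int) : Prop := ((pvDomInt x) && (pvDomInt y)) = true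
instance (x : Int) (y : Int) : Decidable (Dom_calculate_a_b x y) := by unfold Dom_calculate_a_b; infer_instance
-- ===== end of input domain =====

-- B replaces each fixed-range summation loop with its closed-form constant (simpler).

-- ===== PORT A =====
def calculate_a_b (x : Int) (y : Int) : Int × Int :=
  if x > 10 then
    let a := (PySem.List.pyRange 0 10 1).foldl (fun s i => s + i * x) 0
    let b := (PySem.List.pyRange 0 5 1).foldl (fun s j => s + j * y) 0
    (a, b)
  else
    let a := (PySem.List.pyRange 0 5 1).foldl (fun s i =>
      (PySem.List.pyRange 0 5 1).foldl (fun s j => s + i * j * x) s) 0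
    let b := (PySem.List.pyRange 0 5 1).foldl (fun s i =>
      (PySem.List.pyRange 0 5 1).foldl (fun s j =>
        if PySem.Int.mod j 2 == 0 then s + (i + j) else s) s) 0
    (a, b)

-- ===== PORT B =====
def calculate_a_b_alt (x : Int) (y : Int) : Int × Int :=
  if x > 10 then (45 * x, 10 * y) else (100 * x, 60)

-- ===== PRECONDITION & SPEC =====
def Spec_calculate_a_b (x : Int) (y : Int) (out : Int × Int) : Prop := out = calculate_a_b_alt x y
instance (x : Int) (y : Int) (out : Int × Int) : Decidable (Spec_calculate_a_b x y out) := by unfold Spec_calculate_a_b; infer_instance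

-- ===== CLAIM (what is proved, stated in full; the proofs are below) =====
def Claim_equal_calculate_a_b : Prop := ∀ (x : Int) (y : Int), Dom_calculate_a_b x y → Spec_calculate_a_b x y (calculate_a_b x y)

-- ===== LEMMAS AND PROOFS =====

-- ===== VERDICT (by name: the statement is the Claim_ definition above) =====
theorem calculate_a_b_spec : Claim_equal_calculate_a_b := by
  intro x y _
  unfold Spec_calculate_a_b calculate_a_b calculate_a_b_alt
  by_cases h : x > 10
  · simp [h, PySem.List.pyRange, List.range_succ]
    constructor <;> ring
  · simp [h, PySem.List.pyRange, PySem.Int.mod, List.range_succ]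
    ring
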